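-- pv_equiv track=rewrite | github.com/changyeon2/Algorithm | programmers/모의고사/solution 1.py | solution
-- ===== SOURCE A (Python) =====
-- def solution(answers):
--     person1 = [1, 2, 3, 4, 5]
--     person2 = [2, 1, 2, 3, 2, 4, 2, 5]
--     person3 = [3, 3, 1, 1, 2, 2, 4, 4, 5, 5]
--
--     correct = [0, 0, 0]
--
--     for i in range(len(answers)):
--         if answers[i] == person1[i%5]:
--             correct[0] += 1
--         if answers[i] == person2[i%8]:
--             correct[1] += 1
--         if answers[i] == person3[i%10]:
--             correct[2] += 1
--
--     maxCorrect = max(correct)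
--     answer = []
--
--     for i in range(3):
--         if correct[i] == maxCorrect:
--             answer.append(i+1)
--
--     return answer
-- ===== SOURCE B (Python) =====
-- def solution(answers):
--     patterns = [[1, 2, 3, 4, 5],
--                 [2, 1, 2, 3, 2, 4, 2, 5],
--                 [3, 3, 1, 1, 2, 2, 4, 4, 5, 5]]
--     # One pass: tally (position mod 40, answer) pairs; 40 = lcm(5, 8, 10), so the
--     # tally determines every student's score via 40 dictionary lookups.
--     counts = {}
--     for i, a in enumerate(answers):
--         k = (i % 40, a)
--         counts[k] = counts.get(k, 0) + 1
--     s1, s2, s3 = (sum(counts.get((r, p[r % len(p)]), 0) for r in range(40))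
--                   for p in patterns)
--     m = max(s1, max(s2, s3))
--     out = []
--     for i, s in enumerate((s1, s2, s3)):
--         if s == m:
--             out.append(i + 1)
--     return out
-- ===== Notes on version B (the rewrite author's own statement) =====
-- stated objective: alternative
-- what changed: A compares every answer against all three cyclic patterns in one interleaved loop; B instead builds a dictionary tallying (index mod 40, answer) pairs in a single pass (40 = lcm of the pattern lengths) and then reads each student's score off the tally with 40 lookups, so no per-element pattern comparison happens at all.
import Mathlib
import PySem

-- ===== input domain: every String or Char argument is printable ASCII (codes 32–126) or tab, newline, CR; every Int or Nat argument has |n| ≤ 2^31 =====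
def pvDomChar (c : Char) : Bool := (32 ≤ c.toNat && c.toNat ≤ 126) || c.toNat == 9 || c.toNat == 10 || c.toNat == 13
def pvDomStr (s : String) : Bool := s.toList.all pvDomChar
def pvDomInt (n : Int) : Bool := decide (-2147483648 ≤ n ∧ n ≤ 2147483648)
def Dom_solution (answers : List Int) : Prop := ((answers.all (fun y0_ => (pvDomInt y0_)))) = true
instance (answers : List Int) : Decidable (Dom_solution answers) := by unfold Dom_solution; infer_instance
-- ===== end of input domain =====

-- B replaces A's per-element comparison against the three patterns by a one-pass tally of
-- (index mod 40, answer) pairs (40 = lcm(5,8,10)) read back with 40 dictionary lookups per student.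

-- ===== PORT A =====
-- A's single loop over i in range(len(answers)), updating the three counters together.
def solLoopA : List Int → Nat → Int → Int → Int → (Int × Int × Int)
  | [], _, c1, c2, c3 => (c1, c2, c3)
  | a :: rest, i, c1, c2, c3 =>
    solLoopA rest (i + 1)
      (if a = ([1, 2, 3, 4, 5] : List Int).getD (i % 5) 0 then c1 + 1 else c1)
      (if a = ([2, 1, 2, 3, 2, 4, 2, 5] : List Int).getD (i % 8) 0 then c2 + 1 else c2)
      (if a = ([3, 3, 1, 1, 2, 2, 4, 4, 5, 5] : List Int).getD (i % 10) 0 then c3 + 1 else c3)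

def solution (answers : List Int) : List Int :=
  let c := solLoopA answers 0 0 0 0
  let maxCorrect := max c.1 (max c.2.1 c.2.2)
  (if c.1 = maxCorrect then [1] else []) ++
  (if c.2.1 = maxCorrect then [2] else []) ++
  (if c.2.2 = maxCorrect then [3] else [])

-- ===== PORT B =====
-- the one-pass tally: counts[(i % 40, a)] = counts.get(k, 0) + 1
def solTally (answers : List Int) : PySem.Dict (Int × Int) Int :=
  (PySem.List.enumerate answers).foldl
    (fun d x =>
      d.insert (PySem.Int.mod x.1 40, x.2)
        (d.getD (PySem.Int.mod x.1 40, x.2) 0 + 1))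
    PySem.Dict.empty

-- one student's score read off the tally: sum(counts.get((r, p[r % len(p)]), 0) for r in range(40))
def solScoreB (counts : PySem.Dict (Int × Int) Int) (p : List Int) : Int :=
  ((PySem.List.pyRange 0 40).map
    (fun r => counts.getD (r, PySem.List.pyGetD p (PySem.Int.mod r (p.length : Int)) 0) 0)).sum

def solution_alt (answers : List Int) : List Int :=
  let counts := solTally answers
  let s1 := solScoreB counts [1, 2, 3, 4, 5]
  let s2 := solScoreB counts [2, 1, 2, 3, 2, 4, 2, 5]
  let s3 := solScoreB counts [3, 3, 1, 1, 2, 2, 4, 4, 5, 5]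
  let m := max s1 (max s2 s3)
  (PySem.List.enumerate [s1, s2, s3]).foldl
    (fun acc x => if x.2 = m then acc ++ [x.1 + 1] else acc) []

-- ===== PRECONDITION & SPEC =====
def Spec_solution (answers : List Int) (out : List Int) : Prop := out = solution_alt answers
instance (answers : List Int) (out : List Int) : Decidable (Spec_solution answers out) := by unfold Spec_solution; infer_instance

-- ===== CLAIM =====
def Claim_equal_solution : Prop := ∀ (answers : List Int), Dom_solution answers → Spec_solution answers (solution answers)

-- ===== LEMMAS AND PROOFS =====
-- common spec: the score of one pattern, counted left to right from start index n
def scoreSpec (p : List Int) : List Int → Nat → Int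
  | [], _ => 0
  | a :: rest, n => (if a = p.getD (n % p.length) 0 then 1 else 0) + scoreSpec p rest (n + 1)

theorem solLoopA_eq_scores (rest : List Int) : ∀ (i : Nat) (c1 c2 c3 : Int),
    solLoopA rest i c1 c2 c3 =
      (c1 + scoreSpec [1, 2, 3, 4, 5] rest i,
       c2 + scoreSpec [2, 1, 2, 3, 2, 4, 2, 5] rest i,
       c3 + scoreSpec [3, 3, 1, 1, 2, 2, 4, 4, 5, 5] rest i) := by
  induction rest with
  | nil => intro i c1 c2 c3; simp [solLoopA, scoreSpec]
  | cons a rest ih =>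
    intro i c1 c2 c3
    simp only [solLoopA, scoreSpec, ih, Prod.mk.injEq, List.length_cons, List.length_nil]
    norm_num
    refine ⟨?_, ?_, ?_⟩ <;> split_ifs <;> ring

-- summing an indicator over a duplicate-free index list
theorem sum_ite_pair_mem (f : Int → Int) (x : Int × Int) :
    ∀ (L : List Int), L.Nodup →
    (L.map (fun r => if x = (r, f r) then (1 : Int) else 0)).sum
      = if x.1 ∈ L ∧ x.2 = f x.1 then 1 else 0 := by
  intro L
  induction L with
  | nil => simp
  | cons r L ih =>
    intro hnd
    rw [List.nodup_cons] at hnd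
    simp only [List.map_cons, List.sum_cons, ih hnd.2]
    by_cases hx : x = (r, f r)
    · subst hx; simp [hnd.1]
    · have h1 : x.1 = r → x.2 ≠ f x.1 := by
        intro h2 h3; exact hx (Prod.ext h2 (by rw [h3, h2]))
      simp only [if_neg hx, List.mem_cons]
      by_cases hm : x.1 ∈ L ∧ x.2 = f x.1
      · rw [if_pos hm, if_pos ⟨Or.inr hm.1, hm.2⟩]; ring
      · rw [if_neg hm, if_neg ?_]
        · ring
        · rintro ⟨h2 | h2, h3⟩
          · exact h1 h2 h3
          · exact hm ⟨h2, h3⟩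

-- summing per-residue counts of a key list = counting matching keys once
theorem sum_count_eq_countP (f : Int → Int) (ks : List (Int × Int)) :
    ((PySem.List.pyRange 0 40).map (fun r => (ks.count (r, f r) : Int))).sum
      = (ks.countP (fun x => decide (0 ≤ x.1 ∧ x.1 < 40 ∧ x.2 = f x.1)) : Int) := by
  induction ks with
  | nil => simp
  | cons x ks ih =>
    have hcnt : ∀ r : Int, ((x :: ks).count (r, f r) : Int)
        = (ks.count (r, f r) : Int) + (if x = (r, f r) then 1 else 0) := by
      intro r
      by_cases h : x = (r, f r) <;> simp [h]
    simp only [hcnt, PySem.List.sum_map_add_int, ih, List.countP_cons]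
    rw [sum_ite_pair_mem f x _ (by decide)]
    have hmem : x.1 ∈ PySem.List.pyRange 0 40 ↔ 0 ≤ x.1 ∧ x.1 < 40 :=
      PySem.List.mem_pyRange_one
    by_cases hp : 0 ≤ x.1 ∧ x.1 < 40 ∧ x.2 = f x.1
    · rw [if_pos ⟨hmem.mpr ⟨hp.1, hp.2.1⟩, hp.2.2⟩, if_pos (by simpa using hp)]
      push_cast; ring
    · rw [if_neg (by rw [hmem]; tauto), if_neg (by simpa using hp)]
      push_cast; ring

-- the tally lookup is a count over the key list
theorem solTally_getD (answers : List Int) (k : Int × Int) :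
    (solTally answers).getD k 0
      = (((PySem.List.enumerate answers).map
            (fun x => (PySem.Int.mod x.1 40, x.2))).count k : Int) := by
  have h := PySem.Dict.getD_foldl_insert_add_one
      ((PySem.List.enumerate answers).map (fun x => (PySem.Int.mod x.1 40, x.2)))
      PySem.Dict.empty k
  rw [List.foldl_map] at h
  simpa [solTally] using h

-- counting the matching enumerate entries is scoreSpec (needs p.length ∣ 40)
theorem countP_enumerate_eq_scoreSpec (p : List Int) (hdvd : p.length ∣ 40) :
    ∀ (rest : List Int) (n : Nat),
    ((PySem.List.enumerate rest (n : Int)).countP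
        (fun y => decide (0 ≤ PySem.Int.mod y.1 40 ∧ PySem.Int.mod y.1 40 < 40 ∧
          y.2 = PySem.List.pyGetD p (PySem.Int.mod (PySem.Int.mod y.1 40) (p.length : Int)) 0)) : Int)
      = scoreSpec p rest n := by
  intro rest
  induction rest with
  | nil => intro n; simp [PySem.List.enumerate, scoreSpec]
  | cons a rest ih =>
    intro n
    have hcons : PySem.List.enumerate (a :: rest) (n : Int)
        = ((n : Int), a) :: PySem.List.enumerate rest (((n + 1 : Nat)) : Int) := by
      simp [PySem.List.enumerate]
    have h40 : PySem.Int.mod (n : Int) 40 = ((n % 40 : Nat) : Int) := by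
      exact_mod_cast PySem.Int.mod_natCast n 40
    have hmod2 : PySem.Int.mod ((n % 40 : Nat) : Int) (p.length : Int)
        = ((n % p.length : Nat) : Int) := by
      rw [PySem.Int.mod_natCast, Nat.mod_mod_of_dvd n hdvd]
    have hb1 : (0 : Int) ≤ (n : Int) % 40 := by omega
    have hb2 : ((n : Int) % 40) < 40 := by omega
    rw [hcons, List.countP_cons]
    have hih := ih (n + 1)
    push_cast [apply_ite (fun m : Nat => (m : Int))] at hih ⊢
    rw [hih]
    simp only [h40, hmod2, PySem.List.pyGetD_natCast, scoreSpec]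
    simp [hb1, hb2]
    split_ifs <;> ring

-- B's score equals scoreSpec
theorem solScoreB_eq (answers p : List Int) (hdvd : p.length ∣ 40) :
    solScoreB (solTally answers) p = scoreSpec p answers 0 := by
  unfold solScoreB
  simp only [solTally_getD]
  rw [sum_count_eq_countP (fun r => PySem.List.pyGetD p (PySem.Int.mod r (p.length : Int)) 0)]
  rw [List.countP_map]
  have := countP_enumerate_eq_scoreSpec p hdvd answers 0
  simpa [Function.comp] using this

-- the two selection tails agree
theorem tail_eq (s1 s2 s3 m : Int) :
    (PySem.List.enumerate [s1, s2, s3]).foldl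
        (fun acc x => if x.2 = m then acc ++ [x.1 + 1] else acc) []
      = (if s1 = m then [1] else []) ++ (if s2 = m then [2] else []) ++
        (if s3 = m then [3] else []) := by
  simp only [PySem.List.enumerate, List.foldl]
  norm_num
  split_ifs <;> simp

-- ===== VERDICT =====
theorem solution_spec : Claim_equal_solution := by
  intro answers _
  unfold Spec_solution
  simp only [solution, solution_alt, solLoopA_eq_scores,
      solScoreB_eq answers [1, 2, 3, 4, 5] (by norm_num),
      solScoreB_eq answers [2, 1, 2, 3, 2, 4, 2, 5] (by norm_num),
      solScoreB_eq answers [3, 3, 1, 1, 2, 2, 4, 4, 5, 5] (by norm_num),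
      tail_eq]
  norm_num
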